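-- pv_equiv track=rewrite | github.com/cemathey/aoc_2020 | day17/day17.py | generate_neighbors
-- ===== SOURCE A (Python) =====
-- from typing import Sequence, Dict, Tuple, Union, List
--
-- def generate_neighbors(point: Tuple[int, ...], dimensions: int = 3):
--     """Generate all the neighbors of the given 3 or 4 dimensional point."""
--     assert dimensions in (3, 4)
--
--     if dimensions == 3:
--         x, y, z = point
--     else:
--         x, y, z, w = point
--
--     for X in (x - 1, x, x + 1):
--         for Y in (y - 1, y, y + 1):
--             for Z in (z - 1, z, z + 1):
--                 if dimensions == 3:
--                     if (X, Y, Z) != point: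
--                         yield (X, Y, Z)
--                 else:
--                     for W in (w - 1, w, w + 1):
--                         if (X, Y, Z, W) != point:
--                             yield (X, Y, Z, W)
-- ===== SOURCE B (Python) =====
-- def generate_neighbors(point, dimensions=3):
--     """Generate all the neighbors of the given 3 or 4 dimensional point."""
--     assert dimensions in (3, 4)
--     if len(point) != dimensions:
--         raise ValueError("point does not match dimensions")
--
--     def offsets(k):
--         if k == 0:
--             yield ()
--         else:
--             for rest in offsets(k - 1):
--                 for d in (-1, 0, 1):
--                     yield rest + (d,)
--
--     zero = (0,) * dimensions
--     for off in offsets(dimensions):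
--         if off != zero:
--             yield tuple(c + d for c, d in zip(point, off))
-- ===== Notes on version B (the rewrite author's own statement) =====
-- stated objective: alternative
-- what changed: Replaces the dimension-branched nested absolute-coordinate loops by one generic pass over recursively generated (-1,0,1)^d offset tuples, skipping the zero offset and adding each offset to the point componentwise.
import Mathlib
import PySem

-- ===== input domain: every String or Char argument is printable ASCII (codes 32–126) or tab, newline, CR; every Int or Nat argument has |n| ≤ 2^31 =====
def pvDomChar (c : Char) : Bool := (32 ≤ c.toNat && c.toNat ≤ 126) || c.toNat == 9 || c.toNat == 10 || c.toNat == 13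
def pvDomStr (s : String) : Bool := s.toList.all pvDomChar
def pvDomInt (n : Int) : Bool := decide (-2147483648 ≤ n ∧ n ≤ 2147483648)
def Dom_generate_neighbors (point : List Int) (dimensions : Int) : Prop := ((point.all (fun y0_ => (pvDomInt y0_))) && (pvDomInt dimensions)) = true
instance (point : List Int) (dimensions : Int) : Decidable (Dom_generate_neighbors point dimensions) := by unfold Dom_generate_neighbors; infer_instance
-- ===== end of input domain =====

-- ===== PORT A =====
-- Literal port of A's nested loops; where the Python raises (assert / unpacking) the port returns [] (excluded by Pre_).
def generate_neighbors (point : List Int) (dimensions : Int) : List (List Int) :=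
  if dimensions = 3 ∨ dimensions = 4 then
    if dimensions = 3 then
      match point with
      | [x, y, z] =>
        [x - 1, x, x + 1].flatMap fun X =>
          [y - 1, y, y + 1].flatMap fun Y =>
            [z - 1, z, z + 1].filterMap fun Z =>
              if [X, Y, Z] ≠ point then some [X, Y, Z] else none
      | _ => []
    else
      match point with
      | [x, y, z, w] =>
        [x - 1, x, x + 1].flatMap fun X =>
          [y - 1, y, y + 1].flatMap fun Y =>
            [z - 1, z, z + 1].flatMap fun Z =>
              [w - 1, w, w + 1].filterMap fun W =>
                if [X, Y, Z, W] ≠ point then some [X, Y, Z, W] else none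
      | _ => []
  else []

-- ===== PORT B =====
-- offsets k = the tuples of (-1,0,1)^k in B's recursive generation order (last coordinate fastest)
def pvOffsets : Nat → List (List Int)
  | 0 => [[]]
  | k + 1 => (pvOffsets k).flatMap fun rest => [-1, 0, 1].map fun d => rest ++ [d]

-- Port of B: one generic offset pass; where the Python raises, the port returns [] (excluded by Pre_).
def generate_neighbors_alt (point : List Int) (dimensions : Int) : List (List Int) :=
  if dimensions = 3 ∨ dimensions = 4 then
    if point.length = dimensions.toNat then
      (pvOffsets dimensions.toNat).filterMap fun off =>
        if off ≠ List.replicate dimensions.toNat 0 then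
          some ((point.zip off).map fun cd => cd.1 + cd.2)
        else none
    else []
  else []

-- ===== PRECONDITION & SPEC =====
-- Pre_ excludes inputs where the Python A raises: dimensions outside {3,4} (AssertionError) or a point whose length is not dimensions (unpacking ValueError).
def Pre_generate_neighbors (point : List Int) (dimensions : Int) : Prop :=
  (dimensions = 3 ∧ point.length = 3) ∨ (dimensions = 4 ∧ point.length = 4)
instance (point : List Int) (dimensions : Int) : Decidable (Pre_generate_neighbors point dimensions) := by unfold Pre_generate_neighbors; infer_instance
def pvWitness_generate_neighbors : List Int × Int := ([1, 2, 3], 3)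

def Spec_generate_neighbors (point : List Int) (dimensions : Int) (out : List (List Int)) : Prop := out = generate_neighbors_alt point dimensions
instance (point : List Int) (dimensions : Int) (out : List (List Int)) : Decidable (Spec_generate_neighbors point dimensions out) := by unfold Spec_generate_neighbors; infer_instance

-- ===== CLAIM (what is proved, stated in full; the proofs are below) =====
def Claim_equal_generate_neighbors : Prop := ∀ (point : List Int) (dimensions : Int), Dom_generate_neighbors point dimensions → Pre_generate_neighbors point dimensions → Spec_generate_neighbors point dimensions (generate_neighbors point dimensions)

-- ===== LEMMAS AND PROOFS =====


-- ===== VERDICT (by name: the statement is the Claim_ definition above) =====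
theorem generate_neighbors_spec : Claim_equal_generate_neighbors := by
  intro point dimensions _ hpre
  unfold Spec_generate_neighbors
  rcases hpre with ⟨hd, hl⟩ | ⟨hd, hl⟩ <;> subst hd <;>
    rcases point with _ | ⟨x, _ | ⟨y, _ | ⟨z, _ | ⟨w, t⟩⟩⟩⟩ <;> simp_all <;>
    · simp [generate_neighbors, generate_neighbors_alt, pvOffsets, List.flatMap,
        List.filterMap, List.replicate, sub_eq_self]
      omega


-- B changes structure only (one offset-space pass instead of dimension-branched nested loops); same output, same cost.
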